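-- pv_equiv track=rewrite | github.com/afiliz/slug-grub-hub | sghDB.py | addEntryToUserString
-- ===== SOURCE A (Python) =====
-- def addEntryToUserString(entryString, entryToAdd):
--     # create array out of input string and delete last element
--     # last element is created since there is a ',' at end of string
--     entryArr = entryString.split(',')
--     del entryArr[-1]
--
--     # re-add ',' to all elements in array, then create the entry to add to array
--     for i, entry in enumerate(entryArr):
--         newentry = entryArr[i] + ','
--         entryArr[i] = newentry
--     addition = entryToAdd + ','
--
--     # add the new entry entry to array and return array as string
--     entryArr.append(addition)
--     return ''.join(entryArr)
-- ===== SOURCE B (Python) =====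
-- def addEntryToUserString(entryString, entryToAdd):
--     # keep everything up to and including the last comma (empty if none), then append
--     idx = entryString.rfind(',')
--     return entryString[:idx + 1] + entryToAdd + ','
-- ===== Notes on version B (the rewrite author's own statement) =====
-- stated objective: simpler
-- what changed: Replaces the split/delete-last/re-append-comma loop/join pipeline with a single rfind for the last comma and one slice plus concatenation; no intermediate list or loop is built.
import Mathlib
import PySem

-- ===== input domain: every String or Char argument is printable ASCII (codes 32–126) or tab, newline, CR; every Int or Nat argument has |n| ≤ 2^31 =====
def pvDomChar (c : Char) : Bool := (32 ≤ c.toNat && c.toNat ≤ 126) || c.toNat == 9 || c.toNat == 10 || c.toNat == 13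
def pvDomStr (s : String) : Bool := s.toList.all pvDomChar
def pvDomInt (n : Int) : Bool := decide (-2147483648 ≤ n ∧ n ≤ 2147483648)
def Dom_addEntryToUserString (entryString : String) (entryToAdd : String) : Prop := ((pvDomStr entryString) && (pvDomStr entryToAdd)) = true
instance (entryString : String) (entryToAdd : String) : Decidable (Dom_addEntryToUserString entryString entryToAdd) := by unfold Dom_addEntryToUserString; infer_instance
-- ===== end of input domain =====

-- B replaces A's split/delete-last/re-append-comma loop/join pipeline with one rfind for the
-- last comma plus a slice and concatenation (objective: simpler, no intermediate list or loop).
-- Both ports work on code-point lists (String.toList / String.ofList), exact on the domain.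

-- ===== PORT A =====
def addEntryToUserString (entryString : String) (entryToAdd : String) : String :=
  -- entryArr = entryString.split(',')
  let entryArr := PySem.Chars.splitOn entryString.toList [',']
  -- del entryArr[-1]  (split always returns a nonempty list, so this never raises)
  let entryArr := entryArr.dropLast
  -- for i, entry in enumerate(entryArr): entryArr[i] = entryArr[i] + ','
  let entryArr := entryArr.map (fun entry => entry ++ [','])
  -- addition = entryToAdd + ','
  let addition := entryToAdd.toList ++ [',']
  -- entryArr.append(addition); return ''.join(entryArr)
  String.ofList (PySem.Chars.join [] (entryArr ++ [addition]))

-- ===== PORT B =====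
def addEntryToUserString_alt (entryString : String) (entryToAdd : String) : String :=
  -- idx = entryString.rfind(',')
  let idx := PySem.Chars.rfind entryString.toList [',']
  -- return entryString[:idx + 1] + entryToAdd + ','
  String.ofList (PySem.Chars.slice entryString.toList none (some (idx + 1)) ++ entryToAdd.toList ++ [','])

-- ===== PRECONDITION & SPEC =====
def Spec_addEntryToUserString (entryString : String) (entryToAdd : String) (out : String) : Prop := out = addEntryToUserString_alt entryString entryToAdd
instance (entryString : String) (entryToAdd : String) (out : String) : Decidable (Spec_addEntryToUserString entryString entryToAdd out) := by unfold Spec_addEntryToUserString; infer_instance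

-- ===== CLAIM (what is proved, stated in full; the proofs are below) =====
def Claim_equal_addEntryToUserString : Prop := ∀ (entryString : String) (entryToAdd : String), Dom_addEntryToUserString entryString entryToAdd → Spec_addEntryToUserString entryString entryToAdd (addEntryToUserString entryString entryToAdd)

-- ===== LEMMAS AND PROOFS =====

-- structural recursion computing split-on-comma (proved equal to PySem.Chars.splitOn · [','])
def fsplit : List Char → List (List Char)
  | [] => [[]]
  | c :: rest =>
      if c = ',' then [] :: fsplit rest
      else (c :: (fsplit rest).headI) :: (fsplit rest).tail

lemma fsplit_ne_nil (cs : List Char) : fsplit cs ≠ [] := by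
  cases cs with
  | nil => simp [fsplit]
  | cons c rest => simp only [fsplit]; split <;> simp

lemma headI_cons_tail {α : Type} [Inhabited α] (l : List α) (h : l ≠ []) :
    l.headI :: l.tail = l := by
  cases l with
  | nil => exact absurd rfl h
  | cons a t => rfl

lemma splitOn_go_eq (fuel : Nat) (l cur : List Char) (acc : List (List Char))
    (h : l.length < fuel) :
    PySem.Chars.splitOn.go [','] fuel l cur acc
      = acc.reverse ++ ((cur.reverse ++ (fsplit l).headI) :: (fsplit l).tail) := by
  induction fuel generalizing l cur acc with
  | zero => omega
  | succ fuel ih =>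
    cases l with
    | nil => simp [PySem.Chars.splitOn.go, fsplit]
    | cons c rest =>
      by_cases hc : c = ','
      · subst hc
        have hpre : [','].isPrefixOf (',' :: rest) = true := by simp [List.isPrefixOf]
        rw [PySem.Chars.splitOn.go]
        simp only [hpre, if_true, List.length_singleton, List.drop_one, List.tail_cons]
        rw [ih rest [] (cur.reverse :: acc) (by simp at h; omega)]
        simp [fsplit, headI_cons_tail _ (fsplit_ne_nil rest)]
      · have hpre : [','].isPrefixOf (c :: rest) = false := by
          simp [List.isPrefixOf]; intro hh; exact absurd hh.symm hc
        rw [PySem.Chars.splitOn.go]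
        simp only [hpre, Bool.false_eq_true, if_false]
        rw [ih rest (c :: cur) acc (by simp at h ⊢; omega)]
        simp [fsplit, hc]

lemma splitOn_comma (cs : List Char) :
    PySem.Chars.splitOn cs [','] = fsplit cs := by
  unfold PySem.Chars.splitOn
  rw [splitOn_go_eq _ _ _ _ (Nat.lt_succ_self _)]
  simp [headI_cons_tail _ (fsplit_ne_nil cs)]

lemma fsplit_no_comma (cs : List Char) (h : ',' ∉ cs) : fsplit cs = [cs] := by
  induction cs with
  | nil => rfl
  | cons c rest ih =>
    simp only [List.mem_cons, not_or] at h
    simp [fsplit, Ne.symm h.1, ih h.2]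

lemma fsplit_last (u v : List Char) (hv : ',' ∉ v) :
    fsplit (u ++ ',' :: v) = fsplit u ++ [v] := by
  induction u with
  | nil => simp [fsplit, fsplit_no_comma v hv]
  | cons c u' ih =>
    by_cases hc : c = ','
    · subst hc; simp [fsplit, ih]
    · simp only [List.cons_append, fsplit, hc, if_false, ih]
      obtain ⟨p, ps, hp⟩ : ∃ p ps, fsplit u' = p :: ps := by
        cases hfu : fsplit u' with
        | nil => exact absurd hfu (fsplit_ne_nil u')
        | cons p ps => exact ⟨p, ps, rfl⟩
      simp [hp]

lemma intersperse_nil_flatten (parts : List (List Char)) :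
    (List.intersperse ([] : List Char) parts).flatten = parts.flatten := by
  induction parts with
  | nil => rfl
  | cons a l ih =>
    cases l with
    | nil => rfl
    | cons b l' => simpa [List.intersperse] using ih

lemma join_empty_flatten (parts : List (List Char)) :
    PySem.Chars.join [] parts = parts.flatten := by
  simp [PySem.Chars.join, List.intercalate, intersperse_nil_flatten]

lemma join_map_fsplit (u : List Char) :
    ((fsplit u).map (fun p => p ++ [','])).flatten = u ++ [','] := by
  induction u with
  | nil => simp [fsplit]
  | cons c u' ih =>
    by_cases hc : c = ','
    · subst hc; simp [fsplit, ih]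
    · simp only [fsplit, hc, if_false]
      obtain ⟨p, ps, hp⟩ : ∃ p ps, fsplit u' = p :: ps := by
        cases hfu : fsplit u' with
        | nil => exact absurd hfu (fsplit_ne_nil u')
        | cons p ps => exact ⟨p, ps, rfl⟩
      rw [hp] at ih ⊢
      simp only [List.headI_cons, List.tail_cons, List.map_cons, List.flatten_cons] at ih ⊢
      simp only [List.cons_append, List.append_assoc] at ih ⊢
      rw [ih]

lemma rfind_go_no (cs : List Char) (h : ',' ∉ cs) (k : Nat) :
    PySem.Chars.rfind.go cs [','] k = -1 := by
  have hpre : ∀ j : Nat, [','].isPrefixOf (cs.drop j) = false := by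
    intro j
    cases hd : cs.drop j with
    | nil => simp [List.isPrefixOf]
    | cons a t =>
      have : a ∈ cs := by
        have : a ∈ cs.drop j := by rw [hd]; exact List.mem_cons_self
        exact List.mem_of_mem_drop this
      simp [List.isPrefixOf]
      intro hh
      exact absurd (hh ▸ this) h
  induction k with
  | zero =>
    rw [PySem.Chars.rfind.go]
    have h0 := hpre 0
    simp only [List.drop_zero] at h0
    simp [h0]
  | succ k ih =>
    rw [PySem.Chars.rfind.go]
    simp [hpre (k + 1), ih]

lemma rfind_go_last (u v : List Char) (hv : ',' ∉ v) (d : Nat) :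
    PySem.Chars.rfind.go (u ++ ',' :: v) [','] (u.length + d) = u.length := by
  have hat : [','].isPrefixOf ((u ++ ',' :: v).drop u.length) = true := by
    simp [List.isPrefixOf]
  have habove : ∀ j : Nat, u.length < j → [','].isPrefixOf ((u ++ ',' :: v).drop j) = false := by
    intro j hj
    have hdrop : (u ++ ',' :: v).drop j = v.drop (j - u.length - 1) := by
      rw [List.drop_append, List.drop_eq_nil_of_le (le_of_lt hj),
        List.nil_append]
      obtain ⟨m, hm⟩ : ∃ m, j - u.length = m + 1 := ⟨j - u.length - 1, by omega⟩
      rw [hm, List.drop_succ_cons]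
      simp
    rw [hdrop]
    cases hd : v.drop (j - u.length - 1) with
    | nil => simp [List.isPrefixOf]
    | cons a t =>
      have : a ∈ v := List.mem_of_mem_drop (by rw [hd]; exact List.mem_cons_self)
      simp [List.isPrefixOf]
      intro hh
      exact absurd (hh ▸ this) hv
  induction d with
  | zero =>
    rw [Nat.add_zero]
    cases u with
    | nil =>
      simp only [List.length_nil, List.nil_append]
      rw [PySem.Chars.rfind.go]
      have h0 := hat
      simp only [List.length_nil, List.drop_zero, List.nil_append] at h0
      simp [h0]
    | cons a u' =>
      rw [List.length_cons, PySem.Chars.rfind.go.eq_def]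
      have h0 := hat
      simp only [List.length_cons] at h0
      simp only [h0]
      simp
  | succ d ih =>
    have : u.length + (d + 1) = (u.length + d) + 1 := by omega
    rw [this, PySem.Chars.rfind.go]
    simp [habove (u.length + d + 1) (by omega), ih]

lemma rfind_no (cs : List Char) (h : ',' ∉ cs) : PySem.Chars.rfind cs [','] = -1 := by
  unfold PySem.Chars.rfind; exact rfind_go_no cs h _

lemma rfind_last (u v : List Char) (hv : ',' ∉ v) :
    PySem.Chars.rfind (u ++ ',' :: v) [','] = u.length := by
  unfold PySem.Chars.rfind
  have : (u ++ ',' :: v).length = u.length + (1 + v.length) := by simp; omega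
  rw [this]
  exact rfind_go_last u v hv _

lemma last_comma_decomp (cs : List Char) (h : ',' ∈ cs) :
    ∃ u v, cs = u ++ ',' :: v ∧ ',' ∉ v := by
  induction cs with
  | nil => cases h
  | cons c rest ih =>
    by_cases hr : ',' ∈ rest
    · obtain ⟨u, v, huv, hv⟩ := ih hr
      exact ⟨c :: u, v, by simp [huv], hv⟩
    · have hc : c = ',' := by
        rcases List.mem_cons.mp h with h1 | h2
        · exact h1.symm
        · exact absurd h2 hr
      exact ⟨[], rest, by simp [hc], hr⟩

lemma main_chars (cs t : List Char) :
    PySem.Chars.join []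
        (((PySem.Chars.splitOn cs [',']).dropLast.map (fun p => p ++ [','])) ++ [t ++ [',']])
      = PySem.Chars.slice cs none (some (PySem.Chars.rfind cs [','] + 1)) ++ t ++ [','] := by
  rw [join_empty_flatten, splitOn_comma]
  by_cases h : ',' ∈ cs
  · obtain ⟨u, v, huv, hv⟩ := last_comma_decomp cs h
    subst huv
    rw [fsplit_last u v hv, rfind_last u v hv, List.dropLast_concat]
    have hslice : PySem.Chars.slice (u ++ ',' :: v) none (some ((u.length : Int) + 1))
        = u ++ [','] := by
      rw [PySem.Chars.slice_eq_listSlice, PySem.List.slice_to _ (by positivity)]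
      have : ((u.length : Int) + 1).toNat = u.length + 1 := by omega
      rw [this, List.take_append]
      simp
    rw [hslice]
    simp only [List.flatten_append, join_map_fsplit]
    simp
  · rw [fsplit_no_comma cs h, rfind_no cs h]
    have hslice : PySem.Chars.slice cs none (some ((-1 : Int) + 1)) = [] := by
      rw [PySem.Chars.slice_eq_listSlice]
      norm_num
      rw [PySem.List.slice_to _ (by norm_num)]
      simp
    rw [hslice]
    simp

-- ===== VERDICT (by name: the statement is the Claim_ definition above) =====
theorem addEntryToUserString_spec : Claim_equal_addEntryToUserString := by
  intro s t _
  unfold Spec_addEntryToUserString addEntryToUserString addEntryToUserString_alt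
  exact congrArg String.ofList (main_chars s.toList t.toList)
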